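-- pv_equiv track=rewrite | github.com/liujiany22/code_exp | tasks/learning_cycle/task.py | balanced_latin_square
-- ===== SOURCE A (Python) =====
-- def balanced_latin_square(size: int) -> list[list[int]]:
--     if size <= 0:
--         raise ValueError("size must be positive.")
--
--     rows: list[list[int]] = []
--     for row_index in range(size):
--         row: list[int] = []
--         for column_index in range(size):
--             if column_index % 2 == 0:
--                 value = (row_index + (column_index // 2)) % size
--             else:
--                 value = (row_index - ((column_index + 1) // 2)) % size
--             row.append(value)
--         rows.append(row)
--     return rows
-- ===== SOURCE B (Python) =====
-- def balanced_latin_square(size: int) -> list[list[int]]: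
--     if size <= 0:
--         raise ValueError("size must be positive.")
--     first = [((c // 2) % size) if c % 2 == 0 else ((-((c + 1) // 2)) % size)
--              for c in range(size)]
--     rows = [first]
--     prev = first
--     for _ in range(size - 1):
--         prev = [(v + 1) % size for v in prev]
--         rows.append(prev)
--     return rows
-- ===== Notes on version B (the rewrite author's own statement) =====
-- stated objective: alternative
-- what changed: Instead of computing every cell independently from (row,column) coordinates in nested loops, B computes only the first row from the parity formula and derives each subsequent row from the previous one by the recurrence value -> (value+1) % size.
import Mathlib
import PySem

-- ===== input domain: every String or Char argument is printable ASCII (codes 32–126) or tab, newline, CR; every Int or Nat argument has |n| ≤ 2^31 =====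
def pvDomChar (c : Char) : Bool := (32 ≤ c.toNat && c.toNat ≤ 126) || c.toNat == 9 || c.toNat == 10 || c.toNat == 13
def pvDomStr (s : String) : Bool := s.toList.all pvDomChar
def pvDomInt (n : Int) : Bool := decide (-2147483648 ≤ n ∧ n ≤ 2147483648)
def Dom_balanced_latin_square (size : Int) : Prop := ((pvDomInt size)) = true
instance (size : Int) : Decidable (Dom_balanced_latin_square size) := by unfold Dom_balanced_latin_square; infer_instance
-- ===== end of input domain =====

-- B builds only the first row from the parity formula and derives each further row
-- from the previous one by (v+1) % size, instead of A's per-cell coordinate formula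
-- (alternative decomposition, same cost). A raises ValueError for size <= 0 (Pre_).


-- ===== PORT A =====
def balanced_latin_square (size : Int) : List (List Int) :=
  (PySem.List.pyRange 0 size 1).foldl (fun rows row_index =>
    rows ++ [(PySem.List.pyRange 0 size 1).foldl (fun row column_index =>
      row ++ [if PySem.Int.mod column_index 2 = 0 then
                PySem.Int.mod (row_index + PySem.Int.floordiv column_index 2) size
              else
                PySem.Int.mod (row_index - PySem.Int.floordiv (column_index + 1) 2) size]) []]) []

-- ===== PORT B =====
def balanced_latin_square_alt (size : Int) : List (List Int) :=
  let first := (PySem.List.pyRange 0 size 1).map (fun c =>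
    if PySem.Int.mod c 2 = 0 then PySem.Int.mod (PySem.Int.floordiv c 2) size
    else PySem.Int.mod (-(PySem.Int.floordiv (c + 1) 2)) size)
  ((PySem.List.pyRange 0 (size - 1) 1).foldl
    (fun (st : List (List Int) × List Int) _ =>
      let next := st.2.map (fun v => PySem.Int.mod (v + 1) size)
      (st.1 ++ [next], next)) ([first], first)).1

-- ===== PRECONDITION & SPEC =====
-- A raises ValueError exactly when size <= 0.
def Pre_balanced_latin_square (size : Int) : Prop := 1 ≤ size
instance (size : Int) : Decidable (Pre_balanced_latin_square size) := by unfold Pre_balanced_latin_square; infer_instance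
def pvWitness_balanced_latin_square : Int := (3)

def Spec_balanced_latin_square (size : Int) (out : List (List Int)) : Prop := out = balanced_latin_square_alt size
instance (size : Int) (out : List (List Int)) : Decidable (Spec_balanced_latin_square size out) := by unfold Spec_balanced_latin_square; infer_instance

-- ===== CLAIM (what is proved, stated in full; the proofs are below) =====
def Claim_equal_balanced_latin_square : Prop := ∀ (size : Int), Dom_balanced_latin_square size → Pre_balanced_latin_square size → Spec_balanced_latin_square size (balanced_latin_square size)

-- ===== LEMMAS AND PROOFS =====

-- A's cell formula and row, as a map (A's appending inner loop is this map).
def pvCellA (size row_index column_index : Int) : Int :=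
  if PySem.Int.mod column_index 2 = 0 then
    PySem.Int.mod (row_index + PySem.Int.floordiv column_index 2) size
  else
    PySem.Int.mod (row_index - PySem.Int.floordiv (column_index + 1) 2) size

def pvRowA (size r : Int) : List Int :=
  (PySem.List.pyRange 0 size 1).map (pvCellA size r)

lemma pvA_as_map (size : Int) :
    balanced_latin_square size = (PySem.List.pyRange 0 size 1).map (pvRowA size) := by
  unfold balanced_latin_square pvRowA pvCellA
  rw [PySem.List.foldl_append_singleton_eq_map]
  refine List.map_congr_left (fun r _ => ?_)
  rw [PySem.List.foldl_append_singleton_eq_map]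
  simp

-- (a % s + 1) % s = (a + 1) % s for positive s, on PySem.Int.mod.
lemma pvMod_succ (s a : Int) (hs : 1 ≤ s) :
    PySem.Int.mod (PySem.Int.mod a s + 1) s = PySem.Int.mod (a + 1) s := by
  have h : (0 : Int) < s := by omega
  simp only [PySem.Int.mod_eq_emod_of_pos h]
  exact Int.emod_add_emod a s 1

-- incrementing every cell of row r mod size gives row r+1
lemma pvRow_shift (size r : Int) (hs : 1 ≤ size) :
    (pvRowA size r).map (fun v => PySem.Int.mod (v + 1) size) = pvRowA size (r + 1) := by
  unfold pvRowA
  rw [List.map_map]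
  refine List.map_congr_left (fun c _ => ?_)
  unfold pvCellA
  by_cases h : PySem.Int.mod c 2 = 0 <;>
    simp only [h, if_true, if_false, Function.comp_apply, pvMod_succ _ _ hs] <;>
    · congr 1
      ring

-- B's first row is A's row 0
lemma pvFirst_eq_row0 (size : Int) :
    (PySem.List.pyRange 0 size 1).map (fun c =>
      if PySem.Int.mod c 2 = 0 then PySem.Int.mod (PySem.Int.floordiv c 2) size
      else PySem.Int.mod (-(PySem.Int.floordiv (c + 1) 2)) size) = pvRowA size 0 := by
  unfold pvRowA pvCellA
  refine List.map_congr_left (fun c _ => ?_)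
  by_cases h : PySem.Int.mod c 2 = 0 <;> simp only [h, if_true, if_false, zero_add, zero_sub]

-- peeling the first element off a shifted range map
lemma pvRangeShift (f : Int → List Int) (n : Nat) (r : Int) :
    (List.range (n + 1)).map (fun (k : Nat) => f (r + (k : Int)))
      = f r :: (List.range n).map (fun (k : Nat) => f (r + 1 + (k : Int))) := by
  rw [List.range_succ_eq_map, List.map_cons, List.map_map]
  congr 1
  · norm_num
  · refine List.map_congr_left (fun k _ => ?_)
    simp only [Function.comp_apply]
    congr 1
    push_cast
    ring

-- invariant of B's fold: starting from (rows, row r), after |l| steps the first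
-- component is rows followed by rows r+1 … r+|l|.
lemma pvFold_inv (size : Int) (hs : 1 ≤ size) (l : List Int)
    (rows : List (List Int)) (r : Int) :
    (l.foldl (fun (st : List (List Int) × List Int) _ =>
        let next := st.2.map (fun v => PySem.Int.mod (v + 1) size)
        (st.1 ++ [next], next)) (rows, pvRowA size r)).1
    = rows ++ (List.range l.length).map (fun (k : Nat) => pvRowA size (r + 1 + (k : Int))) := by
  induction l generalizing rows r with
  | nil => simp
  | cons x xs ih =>
    simp only [List.foldl_cons, pvRow_shift size r hs]
    rw [ih (rows ++ [pvRowA size (r + 1)]) (r + 1), List.length_cons,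
        pvRangeShift (pvRowA size) xs.length (r + 1)]
    simp

-- ===== VERDICT (by name: the statement is the Claim_ definition above) =====
theorem balanced_latin_square_spec : Claim_equal_balanced_latin_square := by
  intro size _ hpre
  unfold Spec_balanced_latin_square balanced_latin_square_alt
  rw [pvA_as_map, pvFirst_eq_row0, pvFold_inv size hpre _ [pvRowA size 0] 0,
      PySem.List.pyRange_one 0 size, List.map_map]
  have hn : (size - 0).toNat = (size - 1 - 0).toNat + 1 := by
    have := hpre
    unfold Pre_balanced_latin_square at this
    omega
  rw [PySem.List.length_pyRange_one, hn]
  simp only [Function.comp_def]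
  rw [pvRangeShift (pvRowA size) ((size - 1 - 0).toNat) 0]
  simp
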